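-- pv_equiv track=rewrite | github.com/MaayanMordehai/Data-Structure-Course | First Assignment/exercise2.py | get_direction_count_matrix
-- ===== SOURCE A (Python) =====
-- def get_direction_count_matrix(M, m):
--     """
--     This function creating matrix of dictionaries that containes the direction and the number of 1s in this direction on the M including the current point.
--     Parameters:
--         M - boolean matrix of mxm
--         m - size of the cols and rows in the matrix
--     Returns:
--         matrix - the matrix of dictionaries
--     """
--
--     # setting the matrix as mxm with default value
--     matrix = [[{'up' : 0, 'down': 0, 'left': 0, 'right': 0} for i in range(m)] for i in range(m)]
--
--     #
--     # Setting the new matrix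
--     # setting the up and left values by going over the matrix from the start
--     # and setting the down and right values by going over the matrix from the end
--     #
--
--     # starting from the first and last rows
--     x_from_start = 0
--     x_from_end = m - 1
--
--     while x_from_start < m and x_from_end >= 0:
--         # setting to the begging and ending of the row
--         y_from_start = 0
--         y_from_end= m - 1
--
--         while y_from_start < m and y_from_end >= 0:
--             # if there is a cross in the current point from the start
--             if M[y_from_start][x_from_start]:
--                 # counting the point itself
--                 matrix[y_from_start][x_from_start]['up']+=1
--                 matrix[y_from_start][x_from_start]['left']+=1
--
--                 # adding the number of 1s up
--                 if y_from_start - 1 >= 0: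
--                     matrix[y_from_start][x_from_start]['up']+=matrix[y_from_start-1][x_from_start]['up']
--
--                 # adding the number of 1s left
--                 if x_from_start - 1 >= 0:
--                     matrix[y_from_start][x_from_start]['left']+=matrix[y_from_start][x_from_start-1]['left']
--
--             # if there is a cross in the current point from the end
--             if M[y_from_end][x_from_end]:
--                 # counting the point itself
--                 matrix[y_from_end][x_from_end]['down']+=1
--                 matrix[y_from_end][x_from_end]['right']+=1
--
--                 # adding the number of 1s down
--                 if y_from_end + 1 < m:
--                     matrix[y_from_end][x_from_end]['down']+=matrix[y_from_end+1][x_from_end]['down']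
--
--                 # adding the number of 1s right
--                 if x_from_end + 1 < m:
--                     matrix[y_from_end][x_from_end]['right']+=matrix[y_from_end][x_from_end+1]['right']
--             # going to the next col from start and end
--             y_from_start+=1
--             y_from_end-=1
--         # going to the next row from start and end
--         x_from_start+=1
--         x_from_end-=1
--
--     return matrix
-- ===== SOURCE B (Python) =====
-- def get_direction_count_matrix(M, m):
--     """Same output as A: per-cell dicts of consecutive-1 counts in each direction.
--     Simpler decomposition: one running-counter scan per line (rows for left/right,
--     transposed columns for up/down) instead of A's braided two-pointer DP loop."""
--     def scan(vals):
--         # counts of the run of truthy values ending at each position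
--         out = []
--         c = 0
--         for v in vals:
--             c = c + 1 if v else 0
--             out.append(c)
--         return out
--
--     grid = [[M[y][x] for x in range(m)] for y in range(m)]
--     left = [scan(row) for row in grid]
--     right = [scan(row[::-1])[::-1] for row in grid]
--     cols = [[grid[y][x] for y in range(m)] for x in range(m)]
--     upT = [scan(col) for col in cols]
--     downT = [scan(col[::-1])[::-1] for col in cols]
--     return [[{'up': upT[x][y], 'down': downT[x][y], 'left': left[y][x], 'right': right[y][x]}
--              for x in range(m)] for y in range(m)]
-- ===== Notes on version B (the rewrite author's own statement) =====
-- stated objective: simpler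
-- what changed: Replaces A's single braided two-pointer loop (filling up/left from one end and down/right from the other in the same pass, each cell reading its already-filled neighbour) with four independent running-counter line scans: left/right by scanning each row (and its reverse), up/down by scanning each transposed column, assembling the dicts at the end.
import Mathlib
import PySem

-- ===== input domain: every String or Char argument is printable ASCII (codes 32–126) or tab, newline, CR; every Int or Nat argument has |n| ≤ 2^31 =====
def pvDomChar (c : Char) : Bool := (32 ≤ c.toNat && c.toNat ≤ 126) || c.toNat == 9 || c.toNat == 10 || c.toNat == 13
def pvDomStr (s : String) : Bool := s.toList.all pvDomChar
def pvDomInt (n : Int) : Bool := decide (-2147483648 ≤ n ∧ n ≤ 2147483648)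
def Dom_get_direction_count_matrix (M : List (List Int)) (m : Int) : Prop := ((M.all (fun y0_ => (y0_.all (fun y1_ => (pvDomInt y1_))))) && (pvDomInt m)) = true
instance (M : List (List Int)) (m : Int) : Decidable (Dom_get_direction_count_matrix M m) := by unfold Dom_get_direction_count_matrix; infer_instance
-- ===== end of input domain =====

-- B replaces A's braided two-pointer DP loop with four independent running-counter
-- line scans (rows and transposed columns); same output, objective: simpler.

-- ===== PORT A =====
-- {'up':0,'down':0,'left':0,'right':0}
def aCellInit : PySem.Dict String Int :=
  PySem.Dict.mk [("up", 0), ("down", 0), ("left", 0), ("right", 0)]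

-- M[y][x]  (exact for the in-range indices admitted by Pre_)
def aGetM (M : List (List Int)) (y x : Int) : Int :=
  PySem.List.pyGetD (PySem.List.pyGetD M y []) x 0

-- matrix[y][x][k]
def aGet (mat : List (List (PySem.Dict String Int))) (y x : Int) (k : String) : Int :=
  (PySem.List.pyGetD (PySem.List.pyGetD mat y []) x PySem.Dict.empty).getD k 0

-- matrix[y][x][k] += v  (in-place dict update, functionally)
def aAdd (mat : List (List (PySem.Dict String Int))) (y x : Int) (k : String) (v : Int) :
    List (List (PySem.Dict String Int)) :=
  PySem.List.pySetD mat y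
    (PySem.List.pySetD (PySem.List.pyGetD mat y []) x
      ((PySem.List.pyGetD (PySem.List.pyGetD mat y []) x PySem.Dict.empty).modify k 0 (· + v)))

-- the inner while loop (y_from_start / y_from_end)
def aInner (M : List (List Int)) (m xfs xfe : Int) (yfs yfe : Int)
    (mat : List (List (PySem.Dict String Int))) : List (List (PySem.Dict String Int)) :=
  if h : yfs < m ∧ 0 ≤ yfe then
    let mat1 :=
      if aGetM M yfs xfs ≠ 0 then
        let t1 := aAdd mat yfs xfs "up" 1
        let t2 := aAdd t1 yfs xfs "left" 1
        let t3 := if 0 ≤ yfs - 1 then aAdd t2 yfs xfs "up" (aGet t2 (yfs - 1) xfs "up") else t2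
        if 0 ≤ xfs - 1 then aAdd t3 yfs xfs "left" (aGet t3 yfs (xfs - 1) "left") else t3
      else mat
    let mat2 :=
      if aGetM M yfe xfe ≠ 0 then
        let t1 := aAdd mat1 yfe xfe "down" 1
        let t2 := aAdd t1 yfe xfe "right" 1
        let t3 := if yfe + 1 < m then aAdd t2 yfe xfe "down" (aGet t2 (yfe + 1) xfe "down") else t2
        if xfe + 1 < m then aAdd t3 yfe xfe "right" (aGet t3 yfe (xfe + 1) "right") else t3
      else mat1
    aInner M m xfs xfe (yfs + 1) (yfe - 1) mat2
  else mat
termination_by (m - yfs).toNat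
decreasing_by omega

-- the outer while loop (x_from_start / x_from_end)
def aOuter (M : List (List Int)) (m : Int) (xfs xfe : Int)
    (mat : List (List (PySem.Dict String Int))) : List (List (PySem.Dict String Int)) :=
  if h : xfs < m ∧ 0 ≤ xfe then
    aOuter M m (xfs + 1) (xfe - 1) (aInner M m xfs xfe 0 (m - 1) mat)
  else mat
termination_by (m - xfs).toNat
decreasing_by omega

def get_direction_count_matrix (M : List (List Int)) (m : Int) :
    List (List (List (String × Int))) :=
  let matrix := (PySem.List.pyRange 0 m 1).map (fun _ =>
    (PySem.List.pyRange 0 m 1).map (fun _ => aCellInit))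
  ((aOuter M m 0 (m - 1) matrix).map (fun row => row.map PySem.Dict.items))

-- ===== PORT B =====
-- scan(vals): running counter of the run of truthy values ending at each position
def bScan (vals : List Int) : List Int :=
  (vals.foldl (fun (st : List Int × Int) v =>
    let c := if v ≠ 0 then st.2 + 1 else 0
    (st.1 ++ [c], c)) ([], 0)).1

-- t[i][j]
def bIdx (t : List (List Int)) (i j : Int) : Int :=
  PySem.List.pyGetD (PySem.List.pyGetD t i []) j 0

def get_direction_count_matrix_alt (M : List (List Int)) (m : Int) :
    List (List (List (String × Int))) :=
  let rng := PySem.List.pyRange 0 m 1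
  let grid := rng.map (fun y => rng.map (fun x =>
    PySem.List.pyGetD (PySem.List.pyGetD M y []) x 0))
  let left := grid.map bScan
  -- row[::-1] is List.reverse
  let right := grid.map (fun row => (bScan row.reverse).reverse)
  let cols := rng.map (fun x => rng.map (fun y => bIdx grid y x))
  let upT := cols.map bScan
  let downT := cols.map (fun col => (bScan col.reverse).reverse)
  rng.map (fun y => rng.map (fun x =>
    [("up", bIdx upT x y), ("down", bIdx downT x y),
     ("left", bIdx left y x), ("right", bIdx right y x)]))

-- ===== PRECONDITION & SPEC =====
-- Pre_ excludes exactly the inputs where Python A raises IndexError: when 0 < m,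
-- M must have at least m rows and each of its first m rows at least m entries.
def Pre_get_direction_count_matrix (M : List (List Int)) (m : Int) : Prop :=
  0 < m → (m ≤ (M.length : Int) ∧ ∀ row ∈ M.take m.toNat, m ≤ (row.length : Int))
instance (M : List (List Int)) (m : Int) : Decidable (Pre_get_direction_count_matrix M m) := by
  unfold Pre_get_direction_count_matrix; infer_instance

def pvWitness_get_direction_count_matrix : List (List Int) × Int := ([[1, 0], [1, 1]], 2)

def Spec_get_direction_count_matrix (M : List (List Int)) (m : Int)
    (out : List (List (List (String × Int)))) : Prop :=
  out = get_direction_count_matrix_alt M m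
instance (M : List (List Int)) (m : Int) (out : List (List (List (String × Int)))) :
    Decidable (Spec_get_direction_count_matrix M m out) := by
  unfold Spec_get_direction_count_matrix; infer_instance

-- ===== CLAIM (what is proved, stated in full; the proofs are below) =====
def Claim_equal_get_direction_count_matrix : Prop :=
  ∀ (M : List (List Int)) (m : Int), Dom_get_direction_count_matrix M m →
    Pre_get_direction_count_matrix M m →
    Spec_get_direction_count_matrix M m (get_direction_count_matrix M m)

-- ===== LEMMAS AND PROOFS =====

-- the common specification: run counts in each direction
def runF (f : Nat → Int) : Nat → Int
  | 0 => if f 0 ≠ 0 then 1 else 0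
  | Nat.succ x => if f (x + 1) ≠ 0 then runF f x + 1 else 0

def gvN (M : List (List Int)) (y x : Nat) : Int := (M.getD y []).getD x 0

def upS (M : List (List Int)) (y x : Nat) : Int := runF (fun i => gvN M i x) y
def leftS (M : List (List Int)) (y x : Nat) : Int := runF (fun i => gvN M y i) x
def downS (M : List (List Int)) (n y x : Nat) : Int :=
  runF (fun i => gvN M (n - 1 - i) x) (n - 1 - y)
def rightS (M : List (List Int)) (n y x : Nat) : Int :=
  runF (fun i => gvN M y (n - 1 - i)) (n - 1 - x)

def specMat (M : List (List Int)) (n : Nat) : List (List (List (String × Int))) :=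
  (List.range n).map (fun y => (List.range n).map (fun x =>
    [("up", upS M y x), ("down", downS M n y x),
     ("left", leftS M y x), ("right", rightS M n y x)]))

-- generic list facts
theorem pvRevMapRange {α : Type} (n : Nat) (f : Nat → α) :
    ((List.range n).map f).reverse = (List.range n).map (fun i => f (n - 1 - i)) := by
  apply List.ext_getElem (by simp)
  intro i h1 h2
  simp [List.getElem_reverse]

theorem pvPySetDMapPyRange {α : Type} (f : Int → α) (m i : Int) (v : α)
    (h0 : 0 ≤ i) (_hi : i < m) :
    PySem.List.pySetD ((PySem.List.pyRange 0 m 1).map f) i v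
      = (PySem.List.pyRange 0 m 1).map (fun t => if t = i then v else f t) := by
  rw [PySem.List.pySetD_of_nonneg _ _ h0]
  apply List.ext_getElem (by simp)
  intro j h1 h2
  simp only [List.getElem_set, List.getElem_map, PySem.List.getElem_pyRange_one]
  have hj : j < (m - 0).toNat := by simpa [PySem.List.length_pyRange_one] using (by simpa using h2)
  split_ifs with h h' <;> first | rfl | omega

-- B-side: characterisation of bScan on a range comprehension
def bLast (f : Nat → Int) : Nat → Int
  | 0 => 0
  | Nat.succ k => runF f k

theorem pvBScanPair (f : Nat → Int) (n : Nat) :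
    ((List.range n).map f).foldl (fun (st : List Int × Int) v =>
      let c := if v ≠ 0 then st.2 + 1 else 0
      (st.1 ++ [c], c)) ([], 0) = ((List.range n).map (runF f), bLast f n) := by
  induction n with
  | zero => simp [bLast]
  | succ k ih =>
    rw [List.range_succ, List.map_append, List.foldl_append, ih]
    have : (if f k ≠ 0 then bLast f k + 1 else 0) = runF f k := by
      cases k with
      | zero => simp [bLast, runF]
      | succ k' => simp [bLast, runF]
    simp only [List.map_cons, List.map_nil, List.foldl_cons, List.foldl_nil]
    rw [this]
    simp [bLast]

theorem pvBScanRange (f : Nat → Int) (n : Nat) :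
    bScan ((List.range n).map f) = (List.range n).map (runF f) := by
  rw [bScan, pvBScanPair]

theorem pvBIdxMapRange (F : Nat → Nat → Int) (n i j : Nat) (hi : i < n) (hj : j < n) :
    bIdx ((List.range n).map (fun a => (List.range n).map (F a))) (i : Int) (j : Int) = F i j := by
  simp [bIdx, hi, hj]

theorem get_direction_count_matrix_alt_eq (M : List (List Int)) (m : Int) :
    get_direction_count_matrix_alt M m = specMat M m.toNat := by
  have hrng : PySem.List.pyRange 0 m 1 = (List.range m.toNat).map (fun k : Nat => (k : Int)) := by
    simp [PySem.List.pyRange_one]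
  simp only [get_direction_count_matrix_alt]
  have h1 : (PySem.List.pyRange 0 m 1).map (fun y => (PySem.List.pyRange 0 m 1).map (fun x =>
        PySem.List.pyGetD (PySem.List.pyGetD M y []) x 0))
      = (List.range m.toNat).map (fun a => (List.range m.toNat).map (gvN M a)) := by
    rw [hrng]
    simp [List.map_map, Function.comp, gvN]
  rw [h1]
  have h2 : (PySem.List.pyRange 0 m 1).map (fun x => (PySem.List.pyRange 0 m 1).map (fun y =>
        bIdx ((List.range m.toNat).map (fun a => (List.range m.toNat).map (gvN M a))) y x))
      = (List.range m.toNat).map (fun a => (List.range m.toNat).map (fun b => gvN M b a)) := by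
    rw [hrng]
    simp only [List.map_map]
    apply List.map_congr_left
    intro a ha
    simp only [Function.comp]
    apply List.map_congr_left
    intro b hb
    exact pvBIdxMapRange (fun p q => gvN M p q) m.toNat b a (List.mem_range.mp hb) (List.mem_range.mp ha)
  rw [h2]
  have h3 : ((List.range m.toNat).map (fun a => (List.range m.toNat).map (gvN M a))).map bScan
      = (List.range m.toNat).map (fun y => (List.range m.toNat).map (fun x => leftS M y x)) := by
    simp only [List.map_map]
    apply List.map_congr_left
    intro a ha
    simp only [Function.comp]
    rw [pvBScanRange]
    rfl
  rw [h3]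
  have h4 : ((List.range m.toNat).map (fun a => (List.range m.toNat).map (fun b => gvN M b a))).map bScan
      = (List.range m.toNat).map (fun x => (List.range m.toNat).map (fun y => upS M y x)) := by
    simp only [List.map_map]
    apply List.map_congr_left
    intro a ha
    simp only [Function.comp]
    rw [pvBScanRange]
    rfl
  rw [h4]
  have h5 : ((List.range m.toNat).map (fun a => (List.range m.toNat).map (gvN M a))).map
        (fun row => (bScan row.reverse).reverse)
      = (List.range m.toNat).map (fun y => (List.range m.toNat).map (fun x => rightS M m.toNat y x)) := by
    simp only [List.map_map]
    apply List.map_congr_left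
    intro a ha
    simp only [Function.comp]
    rw [pvRevMapRange, pvBScanRange, pvRevMapRange]
    rfl
  rw [h5]
  have h6 : ((List.range m.toNat).map (fun a => (List.range m.toNat).map (fun b => gvN M b a))).map
        (fun col => (bScan col.reverse).reverse)
      = (List.range m.toNat).map (fun x => (List.range m.toNat).map (fun y => downS M m.toNat y x)) := by
    simp only [List.map_map]
    apply List.map_congr_left
    intro a ha
    simp only [Function.comp]
    rw [pvRevMapRange, pvBScanRange, pvRevMapRange]
    rfl
  rw [h6]
  rw [specMat, hrng]
  simp only [List.map_map]
  apply List.map_congr_left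
  intro y hy
  simp only [Function.comp]
  apply List.map_congr_left
  intro x hx
  simp only [Function.comp]
  have hy' := List.mem_range.mp hy
  have hx' := List.mem_range.mp hx
  rw [pvBIdxMapRange (fun a b => upS M b a) m.toNat x y hx' hy',
      pvBIdxMapRange (fun a b => downS M m.toNat b a) m.toNat x y hx' hy',
      pvBIdxMapRange (fun a b => leftS M a b) m.toNat y x hy' hx',
      pvBIdxMapRange (fun a b => rightS M m.toNat a b) m.toNat y x hy' hx']


-- A-side: recurrences for the run counts, in the Int-indexed form A's loop uses
theorem pvGetMEq (M : List (List Int)) (y x : Int) (hy : 0 ≤ y) (hx : 0 ≤ x) :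
    aGetM M y x = gvN M y.toNat x.toNat := by
  simp [aGetM, gvN, PySem.List.pyGetD_of_nonneg _ _ hy, PySem.List.pyGetD_of_nonneg _ _ hx]

theorem pvUpRec (M : List (List Int)) (y x : Int) (hy : 0 ≤ y) (hx : 0 ≤ x) :
    upS M y.toNat x.toNat =
      if aGetM M y x ≠ 0 then (if 1 ≤ y then upS M (y - 1).toNat x.toNat + 1 else 1) else 0 := by
  rw [pvGetMEq M y x hy hx]
  rcases Nat.eq_zero_or_eq_succ_pred y.toNat with h0 | hs
  · have hy1 : ¬ (1 ≤ y) := by omega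
    rw [upS, h0, runF]
    simp [hy1]
  · have hy1 : 1 ≤ y := by omega
    have h1 : (y - 1).toNat = y.toNat - 1 := by omega
    rw [upS, hs, runF]
    simp [hy1, upS, h1, Nat.pred_eq_sub_one]

theorem pvLeftRec (M : List (List Int)) (y x : Int) (hy : 0 ≤ y) (hx : 0 ≤ x) :
    leftS M y.toNat x.toNat =
      if aGetM M y x ≠ 0 then (if 1 ≤ x then leftS M y.toNat (x - 1).toNat + 1 else 1) else 0 := by
  rw [pvGetMEq M y x hy hx]
  rcases Nat.eq_zero_or_eq_succ_pred x.toNat with h0 | hs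
  · have hx1 : ¬ (1 ≤ x) := by omega
    rw [leftS, h0, runF]
    simp [hx1]
  · have hx1 : 1 ≤ x := by omega
    have h1 : (x - 1).toNat = x.toNat - 1 := by omega
    rw [leftS, hs, runF]
    simp [hx1, leftS, h1, Nat.pred_eq_sub_one]

theorem pvDownRec (M : List (List Int)) (m y x : Int) (hy : 0 ≤ y) (hym : y < m) (hx : 0 ≤ x) :
    downS M m.toNat y.toNat x.toNat =
      if aGetM M y x ≠ 0 then
        (if y + 1 < m then downS M m.toNat (y + 1).toNat x.toNat + 1 else 1) else 0 := by
  rw [pvGetMEq M y x hy hx]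
  by_cases hb : y + 1 < m
  · have hs : m.toNat - 1 - y.toNat = (m.toNat - 1 - (y + 1).toNat) + 1 := by omega
    rw [downS, hs, runF]
    have h2 : m.toNat - 1 - (m.toNat - 1 - (y + 1).toNat + 1) = y.toNat := by omega
    rw [h2]
    simp [hb, downS]
  · have h0 : m.toNat - 1 - y.toNat = 0 := by omega
    rw [downS, h0, runF]
    have h2 : m.toNat - 1 - 0 = y.toNat := by omega
    rw [h2]
    simp [hb]

theorem pvRightRec (M : List (List Int)) (m y x : Int) (hy : 0 ≤ y) (hx : 0 ≤ x) (hxm : x < m) :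
    rightS M m.toNat y.toNat x.toNat =
      if aGetM M y x ≠ 0 then
        (if x + 1 < m then rightS M m.toNat y.toNat (x + 1).toNat + 1 else 1) else 0 := by
  rw [pvGetMEq M y x hy hx]
  by_cases hb : x + 1 < m
  · have hs : m.toNat - 1 - x.toNat = (m.toNat - 1 - (x + 1).toNat) + 1 := by omega
    rw [rightS, hs, runF]
    have h2 : m.toNat - 1 - (m.toNat - 1 - (x + 1).toNat + 1) = x.toNat := by omega
    rw [h2]
    simp [hb, rightS]
  · have h0 : m.toNat - 1 - x.toNat = 0 := by omega
    rw [rightS, h0, runF]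
    have h2 : m.toNat - 1 - 0 = x.toNat := by omega
    rw [h2]
    simp [hb]

-- the invariant shape of A's matrix: up/left filled for x < k (plus column k below row ju),
-- down/right filled for x > m-1-k (plus column m-1-k above row m-1-jd)
def cellG (M : List (List Int)) (m k ju jd : Int) (y x : Int) : PySem.Dict String Int :=
  PySem.Dict.mk
    [("up", if x < k ∨ (x = k ∧ y < ju) then upS M y.toNat x.toNat else 0),
     ("down", if m - 1 - k < x ∨ (x = m - 1 - k ∧ m - 1 - jd < y) then downS M m.toNat y.toNat x.toNat else 0),
     ("left", if x < k ∨ (x = k ∧ y < ju) then leftS M y.toNat x.toNat else 0),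
     ("right", if m - 1 - k < x ∨ (x = m - 1 - k ∧ m - 1 - jd < y) then rightS M m.toNat y.toNat x.toNat else 0)]

def GA (M : List (List Int)) (m k ju jd : Int) : List (List (PySem.Dict String Int)) :=
  (PySem.List.pyRange 0 m 1).map (fun y => (PySem.List.pyRange 0 m 1).map (fun x => cellG M m k ju jd y x))

-- dict-literal computation lemmas
theorem pvDictGetUp (u d l r : Int) :
    (PySem.Dict.mk [("up", u), ("down", d), ("left", l), ("right", r)]).getD "up" 0 = u := by
  simp [PySem.Dict.getD, PySem.Dict.get?_mk_cons]
theorem pvDictGetDown (u d l r : Int) :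
    (PySem.Dict.mk [("up", u), ("down", d), ("left", l), ("right", r)]).getD "down" 0 = d := by
  simp [PySem.Dict.getD, PySem.Dict.get?_mk_cons]
theorem pvDictGetLeft (u d l r : Int) :
    (PySem.Dict.mk [("up", u), ("down", d), ("left", l), ("right", r)]).getD "left" 0 = l := by
  simp [PySem.Dict.getD, PySem.Dict.get?_mk_cons]
theorem pvDictGetRight (u d l r : Int) :
    (PySem.Dict.mk [("up", u), ("down", d), ("left", l), ("right", r)]).getD "right" 0 = r := by
  simp [PySem.Dict.getD, PySem.Dict.get?_mk_cons]
theorem pvDictModUp (u d l r v : Int) :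
    (PySem.Dict.mk [("up", u), ("down", d), ("left", l), ("right", r)]).modify "up" 0 (· + v)
      = PySem.Dict.mk [("up", u + v), ("down", d), ("left", l), ("right", r)] := by
  simp [PySem.Dict.modify, PySem.Dict.getD, PySem.Dict.get?_mk_cons, PySem.Dict.insert, PySem.Dict.contains]
theorem pvDictModDown (u d l r v : Int) :
    (PySem.Dict.mk [("up", u), ("down", d), ("left", l), ("right", r)]).modify "down" 0 (· + v)
      = PySem.Dict.mk [("up", u), ("down", d + v), ("left", l), ("right", r)] := by
  simp [PySem.Dict.modify, PySem.Dict.getD, PySem.Dict.get?_mk_cons, PySem.Dict.insert, PySem.Dict.contains]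
theorem pvDictModLeft (u d l r v : Int) :
    (PySem.Dict.mk [("up", u), ("down", d), ("left", l), ("right", r)]).modify "left" 0 (· + v)
      = PySem.Dict.mk [("up", u), ("down", d), ("left", l + v), ("right", r)] := by
  simp [PySem.Dict.modify, PySem.Dict.getD, PySem.Dict.get?_mk_cons, PySem.Dict.insert, PySem.Dict.contains]
theorem pvDictModRight (u d l r v : Int) :
    (PySem.Dict.mk [("up", u), ("down", d), ("left", l), ("right", r)]).modify "right" 0 (· + v)
      = PySem.Dict.mk [("up", u), ("down", d), ("left", l), ("right", r + v)] := by
  simp [PySem.Dict.modify, PySem.Dict.getD, PySem.Dict.get?_mk_cons, PySem.Dict.insert, PySem.Dict.contains]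

-- reads and writes on a matrix given as a double map over pyRange
theorem pvMatGet (c : Int → Int → PySem.Dict String Int) (m y x : Int) (k : String)
    (hy0 : 0 ≤ y) (hym : y < m) (hx0 : 0 ≤ x) (hxm : x < m) :
    aGet ((PySem.List.pyRange 0 m 1).map (fun y' => (PySem.List.pyRange 0 m 1).map (fun x' => c y' x'))) y x k
      = (c y x).getD k 0 := by
  rw [aGet, PySem.List.pyGetD_map_pyRange_of_nonneg _ m y _ hy0 hym,
      PySem.List.pyGetD_map_pyRange_of_nonneg _ m x _ hx0 hxm]

theorem pvMatAdd (c : Int → Int → PySem.Dict String Int) (m y x : Int) (k : String) (v : Int)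
    (hy0 : 0 ≤ y) (hym : y < m) (hx0 : 0 ≤ x) (hxm : x < m) :
    aAdd ((PySem.List.pyRange 0 m 1).map (fun y' => (PySem.List.pyRange 0 m 1).map (fun x' => c y' x'))) y x k v
      = (PySem.List.pyRange 0 m 1).map (fun y' => (PySem.List.pyRange 0 m 1).map (fun x' =>
          if y' = y ∧ x' = x then (c y x).modify k 0 (· + v) else c y' x')) := by
  rw [aAdd, PySem.List.pyGetD_map_pyRange_of_nonneg _ m y _ hy0 hym,
      PySem.List.pyGetD_map_pyRange_of_nonneg _ m x _ hx0 hxm,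
      pvPySetDMapPyRange _ m x _ hx0 hxm,
      pvPySetDMapPyRange _ m y _ hy0 hym]
  apply List.map_congr_left
  intro y' hy'
  by_cases h : y' = y
  · subst h
    rw [if_pos rfl]
    apply List.map_congr_left
    intro x' hx'
    by_cases h2 : x' = x <;> simp [h2]
  · rw [if_neg h]
    apply List.map_congr_left
    intro x' hx'
    rw [if_neg (by tauto)]

theorem pvCellGCongr (M : List (List Int)) (m k ju jd k' ju' jd' y x : Int)
    (hUL : (x < k ∨ (x = k ∧ y < ju)) ↔ (x < k' ∨ (x = k' ∧ y < ju')))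
    (hDR : (m - 1 - k < x ∨ (x = m - 1 - k ∧ m - 1 - jd < y)) ↔
           (m - 1 - k' < x ∨ (x = m - 1 - k' ∧ m - 1 - jd' < y))) :
    cellG M m k ju jd y x = cellG M m k' ju' jd' y x := by
  simp only [cellG, hUL, hDR]

theorem pvBlockUL (M : List (List Int)) (m k j : Int)
    (hk0 : 0 ≤ k) (hkm : k < m) (hj0 : 0 ≤ j) (hjm : j < m) :
    (if aGetM M j k ≠ 0 then
        let t1 := aAdd (GA M m k j j) j k "up" 1
        let t2 := aAdd t1 j k "left" 1
        let t3 := if 0 ≤ j - 1 then aAdd t2 j k "up" (aGet t2 (j - 1) k "up") else t2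
        if 0 ≤ k - 1 then aAdd t3 j k "left" (aGet t3 j (k - 1) "left") else t3
      else GA M m k j j) = GA M m k (j + 1) j := by
  by_cases hc : aGetM M j k = 0
  · rw [if_neg (by simp [hc])]
    unfold GA
    apply List.map_congr_left; intro y hy
    apply List.map_congr_left; intro x hx
    have hy' := PySem.List.mem_pyRange_one.mp hy
    have hx' := PySem.List.mem_pyRange_one.mp hx
    by_cases hyx : x = k ∧ y = j
    · obtain ⟨h1, h2⟩ := hyx; subst h1; subst h2
      have hu : upS M y.toNat x.toNat = 0 := by
        rw [pvUpRec M y x (by omega) (by omega)]; simp [hc]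
      have hl : leftS M y.toNat x.toNat = 0 := by
        rw [pvLeftRec M y x (by omega) (by omega)]; simp [hc]
      simp [cellG, hu, hl]
    · exact pvCellGCongr M m k j j k (j+1) j y x (by omega) (by omega)
  · rw [if_pos hc]
    simp only []
    unfold GA
    rw [pvMatAdd _ m j k _ _ hj0 hjm hk0 hkm]
    rw [pvMatAdd _ m j k _ _ hj0 hjm hk0 hkm]
    by_cases hj1 : 0 ≤ j - 1
    · rw [if_pos hj1, pvMatGet _ m (j - 1) k "up" (by omega) (by omega) hk0 hkm]
      have hne1 : ¬(j - 1 = j ∧ k = k) := by omega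
      rw [if_neg hne1, if_neg hne1]
      have hT1 : (k < k ∨ (k = k ∧ j - 1 < j)) := by omega
      rw [show (cellG M m k j j (j - 1) k).getD "up" 0 = upS M (j - 1).toNat k.toNat by
        unfold cellG; rw [pvDictGetUp, if_pos hT1]]
      rw [pvMatAdd _ m j k _ _ hj0 hjm hk0 hkm]
      by_cases hk1 : 0 ≤ k - 1
      · rw [if_pos hk1, pvMatGet _ m j (k - 1) "left" hj0 hjm (by omega) (by omega)]
        have hne2 : ¬(j = j ∧ k - 1 = k) := by omega
        rw [if_neg hne2, if_neg hne2, if_neg hne2]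
        have hT2 : (k - 1 < k ∨ (k - 1 = k ∧ j < j)) := by omega
        rw [show (cellG M m k j j j (k - 1)).getD "left" 0 = leftS M j.toNat (k - 1).toNat by
          unfold cellG; rw [pvDictGetLeft, if_pos hT2]]
        rw [pvMatAdd _ m j k _ _ hj0 hjm hk0 hkm]
        apply List.map_congr_left; intro y hy
        apply List.map_congr_left; intro x hx
        have hyb := PySem.List.mem_pyRange_one.mp hy
        have hxb := PySem.List.mem_pyRange_one.mp hx
        by_cases hKey : y = j ∧ x = k
        · obtain ⟨h1, h2⟩ := hKey
          rw [h1, h2]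
          have htrue : (j = j ∧ k = k) := ⟨rfl, rfl⟩
          repeat rw [if_pos htrue]
          have hUL0 : ¬(k < k ∨ (k = k ∧ j < j)) := by omega
          have hUL1 : (k < k ∨ (k = k ∧ j < j + 1)) := by omega
          unfold cellG
          repeat rw [if_neg hUL0]
          repeat rw [if_pos hUL1]
          rw [pvDictModUp, pvDictModLeft, pvDictModUp, pvDictModLeft]
          refine congrArg PySem.Dict.mk ?_
          simp only [List.cons.injEq, Prod.mk.injEq, and_true, true_and]
          rw [pvUpRec M j k (by omega) (by omega), pvLeftRec M j k (by omega) (by omega)]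
          simp only [ne_eq, hc, not_false_eq_true, if_true]
          rw [if_pos (by omega : (1:Int) ≤ j), if_pos (by omega : (1:Int) ≤ k)]
          constructor <;> ring
        · simp only [if_neg hKey]
          exact pvCellGCongr M m k j j k (j + 1) j y x (by omega) (by omega)
      · rw [if_neg hk1]
        apply List.map_congr_left; intro y hy
        apply List.map_congr_left; intro x hx
        have hyb := PySem.List.mem_pyRange_one.mp hy
        have hxb := PySem.List.mem_pyRange_one.mp hx
        by_cases hKey : y = j ∧ x = k
        · obtain ⟨h1, h2⟩ := hKey
          rw [h1, h2]
          have htrue : (j = j ∧ k = k) := ⟨rfl, rfl⟩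
          repeat rw [if_pos htrue]
          have hUL0 : ¬(k < k ∨ (k = k ∧ j < j)) := by omega
          have hUL1 : (k < k ∨ (k = k ∧ j < j + 1)) := by omega
          unfold cellG
          repeat rw [if_neg hUL0]
          repeat rw [if_pos hUL1]
          rw [pvDictModUp, pvDictModLeft, pvDictModUp]
          refine congrArg PySem.Dict.mk ?_
          simp only [List.cons.injEq, Prod.mk.injEq, and_true, true_and]
          rw [pvUpRec M j k (by omega) (by omega), pvLeftRec M j k (by omega) (by omega)]
          simp only [ne_eq, hc, not_false_eq_true, if_true]
          rw [if_pos (by omega : (1:Int) ≤ j), if_neg (by omega : ¬ (1:Int) ≤ k)]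
          constructor <;> ring
        · simp only [if_neg hKey]
          exact pvCellGCongr M m k j j k (j + 1) j y x (by omega) (by omega)
    · rw [if_neg hj1]
      by_cases hk1 : 0 ≤ k - 1
      · rw [if_pos hk1, pvMatGet _ m j (k - 1) "left" hj0 hjm (by omega) (by omega)]
        have hne2 : ¬(j = j ∧ k - 1 = k) := by omega
        rw [if_neg hne2, if_neg hne2]
        have hT2 : (k - 1 < k ∨ (k - 1 = k ∧ j < j)) := by omega
        rw [show (cellG M m k j j j (k - 1)).getD "left" 0 = leftS M j.toNat (k - 1).toNat by
          unfold cellG; rw [pvDictGetLeft, if_pos hT2]]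
        rw [pvMatAdd _ m j k _ _ hj0 hjm hk0 hkm]
        apply List.map_congr_left; intro y hy
        apply List.map_congr_left; intro x hx
        have hyb := PySem.List.mem_pyRange_one.mp hy
        have hxb := PySem.List.mem_pyRange_one.mp hx
        by_cases hKey : y = j ∧ x = k
        · obtain ⟨h1, h2⟩ := hKey
          rw [h1, h2]
          have htrue : (j = j ∧ k = k) := ⟨rfl, rfl⟩
          repeat rw [if_pos htrue]
          have hUL0 : ¬(k < k ∨ (k = k ∧ j < j)) := by omega
          have hUL1 : (k < k ∨ (k = k ∧ j < j + 1)) := by omega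
          unfold cellG
          repeat rw [if_neg hUL0]
          repeat rw [if_pos hUL1]
          rw [pvDictModUp, pvDictModLeft, pvDictModLeft]
          refine congrArg PySem.Dict.mk ?_
          simp only [List.cons.injEq, Prod.mk.injEq, and_true, true_and]
          rw [pvUpRec M j k (by omega) (by omega), pvLeftRec M j k (by omega) (by omega)]
          simp only [ne_eq, hc, not_false_eq_true, if_true]
          rw [if_neg (by omega : ¬ (1:Int) ≤ j), if_pos (by omega : (1:Int) ≤ k)]
          constructor <;> ring
        · simp only [if_neg hKey]
          exact pvCellGCongr M m k j j k (j + 1) j y x (by omega) (by omega)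
      · rw [if_neg hk1]
        apply List.map_congr_left; intro y hy
        apply List.map_congr_left; intro x hx
        have hyb := PySem.List.mem_pyRange_one.mp hy
        have hxb := PySem.List.mem_pyRange_one.mp hx
        by_cases hKey : y = j ∧ x = k
        · obtain ⟨h1, h2⟩ := hKey
          rw [h1, h2]
          have htrue : (j = j ∧ k = k) := ⟨rfl, rfl⟩
          repeat rw [if_pos htrue]
          have hUL0 : ¬(k < k ∨ (k = k ∧ j < j)) := by omega
          have hUL1 : (k < k ∨ (k = k ∧ j < j + 1)) := by omega
          unfold cellG
          repeat rw [if_neg hUL0]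
          repeat rw [if_pos hUL1]
          rw [pvDictModUp, pvDictModLeft]
          refine congrArg PySem.Dict.mk ?_
          simp only [List.cons.injEq, Prod.mk.injEq, and_true, true_and]
          rw [pvUpRec M j k (by omega) (by omega), pvLeftRec M j k (by omega) (by omega)]
          simp only [ne_eq, hc, not_false_eq_true, if_true]
          rw [if_neg (by omega : ¬ (1:Int) ≤ j), if_neg (by omega : ¬ (1:Int) ≤ k)]
          constructor <;> ring
        · simp only [if_neg hKey]
          exact pvCellGCongr M m k j j k (j + 1) j y x (by omega) (by omega)

theorem pvBlockDR (M : List (List Int)) (m k j : Int)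
    (hk0 : 0 ≤ k) (hkm : k < m) (hj0 : 0 ≤ j) (hjm : j < m) :
    (if aGetM M (m - 1 - j) (m - 1 - k) ≠ 0 then
        let t1 := aAdd (GA M m k (j + 1) j) (m - 1 - j) (m - 1 - k) "down" 1
        let t2 := aAdd t1 (m - 1 - j) (m - 1 - k) "right" 1
        let t3 := if m - 1 - j + 1 < m then
            aAdd t2 (m - 1 - j) (m - 1 - k) "down" (aGet t2 (m - 1 - j + 1) (m - 1 - k) "down") else t2
        if m - 1 - k + 1 < m then
            aAdd t3 (m - 1 - j) (m - 1 - k) "right" (aGet t3 (m - 1 - j) (m - 1 - k + 1) "right") else t3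
      else GA M m k (j + 1) j) = GA M m k (j + 1) (j + 1) := by
  by_cases hc : aGetM M (m - 1 - j) (m - 1 - k) = 0
  · rw [if_neg (by simp [hc])]
    unfold GA
    apply List.map_congr_left; intro y hy
    apply List.map_congr_left; intro x hx
    have hy' := PySem.List.mem_pyRange_one.mp hy
    have hx' := PySem.List.mem_pyRange_one.mp hx
    by_cases hyx : x = m - 1 - k ∧ y = m - 1 - j
    · obtain ⟨h1, h2⟩ := hyx; subst h1; subst h2
      have hd : downS M m.toNat (m - 1 - j).toNat (m - 1 - k).toNat = 0 := by
        rw [pvDownRec M m (m - 1 - j) (m - 1 - k) (by omega) (by omega) (by omega)]; simp [hc]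
      have hr : rightS M m.toNat (m - 1 - j).toNat (m - 1 - k).toNat = 0 := by
        rw [pvRightRec M m (m - 1 - j) (m - 1 - k) (by omega) (by omega) (by omega)]; simp [hc]
      simp [cellG, hd, hr]
    · exact pvCellGCongr M m k (j + 1) j k (j + 1) (j + 1) y x (by omega) (by omega)
  · rw [if_pos hc]
    simp only []
    unfold GA
    rw [pvMatAdd _ m (m - 1 - j) (m - 1 - k) _ _ (by omega) (by omega) (by omega) (by omega)]
    rw [pvMatAdd _ m (m - 1 - j) (m - 1 - k) _ _ (by omega) (by omega) (by omega) (by omega)]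
    by_cases hj1 : m - 1 - j + 1 < m
    · rw [if_pos hj1, pvMatGet _ m (m - 1 - j + 1) (m - 1 - k) "down" (by omega) (by omega) (by omega) (by omega)]
      have hne1 : ¬(m - 1 - j + 1 = m - 1 - j ∧ m - 1 - k = m - 1 - k) := by omega
      rw [if_neg hne1, if_neg hne1]
      have hT1 : (m - 1 - k < m - 1 - k ∨ (m - 1 - k = m - 1 - k ∧ m - 1 - j < m - 1 - j + 1)) := by omega
      rw [show (cellG M m k (j + 1) j (m - 1 - j + 1) (m - 1 - k)).getD "down" 0
            = downS M m.toNat (m - 1 - j + 1).toNat (m - 1 - k).toNat by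
        unfold cellG; rw [pvDictGetDown, if_pos hT1]]
      rw [pvMatAdd _ m (m - 1 - j) (m - 1 - k) _ _ (by omega) (by omega) (by omega) (by omega)]
      by_cases hk1 : m - 1 - k + 1 < m
      · rw [if_pos hk1, pvMatGet _ m (m - 1 - j) (m - 1 - k + 1) "right" (by omega) (by omega) (by omega) (by omega)]
        have hne2 : ¬(m - 1 - j = m - 1 - j ∧ m - 1 - k + 1 = m - 1 - k) := by omega
        rw [if_neg hne2, if_neg hne2, if_neg hne2]
        have hT2 : (m - 1 - k < m - 1 - k + 1 ∨ (m - 1 - k + 1 = m - 1 - k ∧ m - 1 - j < m - 1 - j)) := by omega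
        rw [show (cellG M m k (j + 1) j (m - 1 - j) (m - 1 - k + 1)).getD "right" 0
              = rightS M m.toNat (m - 1 - j).toNat (m - 1 - k + 1).toNat by
          unfold cellG; rw [pvDictGetRight, if_pos hT2]]
        rw [pvMatAdd _ m (m - 1 - j) (m - 1 - k) _ _ (by omega) (by omega) (by omega) (by omega)]
        apply List.map_congr_left; intro y hy
        apply List.map_congr_left; intro x hx
        have hyb := PySem.List.mem_pyRange_one.mp hy
        have hxb := PySem.List.mem_pyRange_one.mp hx
        by_cases hKey : y = m - 1 - j ∧ x = m - 1 - k
        · obtain ⟨h1, h2⟩ := hKey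
          rw [h1, h2]
          have htrue : (m - 1 - j = m - 1 - j ∧ m - 1 - k = m - 1 - k) := ⟨rfl, rfl⟩
          repeat rw [if_pos htrue]
          have hDR0 : ¬(m - 1 - k < m - 1 - k ∨ (m - 1 - k = m - 1 - k ∧ m - 1 - j < m - 1 - j)) := by omega
          have hDR1 : (m - 1 - k < m - 1 - k ∨ (m - 1 - k = m - 1 - k ∧ m - 1 - (j + 1) < m - 1 - j)) := by omega
          unfold cellG
          repeat rw [if_neg hDR0]
          repeat rw [if_pos hDR1]
          rw [pvDictModDown, pvDictModRight, pvDictModDown, pvDictModRight]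
          refine congrArg PySem.Dict.mk ?_
          simp only [List.cons.injEq, Prod.mk.injEq, and_true, true_and]
          rw [pvDownRec M m (m - 1 - j) (m - 1 - k) (by omega) (by omega) (by omega),
              pvRightRec M m (m - 1 - j) (m - 1 - k) (by omega) (by omega) (by omega)]
          simp only [ne_eq, hc, not_false_eq_true, if_true]
          rw [if_pos hj1, if_pos hk1]
          constructor <;> ring
        · simp only [if_neg hKey]
          exact pvCellGCongr M m k (j + 1) j k (j + 1) (j + 1) y x (by omega) (by omega)
      · rw [if_neg hk1]
        apply List.map_congr_left; intro y hy
        apply List.map_congr_left; intro x hx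
        have hyb := PySem.List.mem_pyRange_one.mp hy
        have hxb := PySem.List.mem_pyRange_one.mp hx
        by_cases hKey : y = m - 1 - j ∧ x = m - 1 - k
        · obtain ⟨h1, h2⟩ := hKey
          rw [h1, h2]
          have htrue : (m - 1 - j = m - 1 - j ∧ m - 1 - k = m - 1 - k) := ⟨rfl, rfl⟩
          repeat rw [if_pos htrue]
          have hDR0 : ¬(m - 1 - k < m - 1 - k ∨ (m - 1 - k = m - 1 - k ∧ m - 1 - j < m - 1 - j)) := by omega
          have hDR1 : (m - 1 - k < m - 1 - k ∨ (m - 1 - k = m - 1 - k ∧ m - 1 - (j + 1) < m - 1 - j)) := by omega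
          unfold cellG
          repeat rw [if_neg hDR0]
          repeat rw [if_pos hDR1]
          rw [pvDictModDown, pvDictModRight, pvDictModDown]
          refine congrArg PySem.Dict.mk ?_
          simp only [List.cons.injEq, Prod.mk.injEq, and_true, true_and]
          rw [pvDownRec M m (m - 1 - j) (m - 1 - k) (by omega) (by omega) (by omega),
              pvRightRec M m (m - 1 - j) (m - 1 - k) (by omega) (by omega) (by omega)]
          simp only [ne_eq, hc, not_false_eq_true, if_true]
          rw [if_pos hj1, if_neg hk1]
          constructor <;> ring
        · simp only [if_neg hKey]
          exact pvCellGCongr M m k (j + 1) j k (j + 1) (j + 1) y x (by omega) (by omega)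
    · rw [if_neg hj1]
      by_cases hk1 : m - 1 - k + 1 < m
      · rw [if_pos hk1, pvMatGet _ m (m - 1 - j) (m - 1 - k + 1) "right" (by omega) (by omega) (by omega) (by omega)]
        have hne2 : ¬(m - 1 - j = m - 1 - j ∧ m - 1 - k + 1 = m - 1 - k) := by omega
        rw [if_neg hne2, if_neg hne2]
        have hT2 : (m - 1 - k < m - 1 - k + 1 ∨ (m - 1 - k + 1 = m - 1 - k ∧ m - 1 - j < m - 1 - j)) := by omega
        rw [show (cellG M m k (j + 1) j (m - 1 - j) (m - 1 - k + 1)).getD "right" 0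
              = rightS M m.toNat (m - 1 - j).toNat (m - 1 - k + 1).toNat by
          unfold cellG; rw [pvDictGetRight, if_pos hT2]]
        rw [pvMatAdd _ m (m - 1 - j) (m - 1 - k) _ _ (by omega) (by omega) (by omega) (by omega)]
        apply List.map_congr_left; intro y hy
        apply List.map_congr_left; intro x hx
        have hyb := PySem.List.mem_pyRange_one.mp hy
        have hxb := PySem.List.mem_pyRange_one.mp hx
        by_cases hKey : y = m - 1 - j ∧ x = m - 1 - k
        · obtain ⟨h1, h2⟩ := hKey
          rw [h1, h2]
          have htrue : (m - 1 - j = m - 1 - j ∧ m - 1 - k = m - 1 - k) := ⟨rfl, rfl⟩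
          repeat rw [if_pos htrue]
          have hDR0 : ¬(m - 1 - k < m - 1 - k ∨ (m - 1 - k = m - 1 - k ∧ m - 1 - j < m - 1 - j)) := by omega
          have hDR1 : (m - 1 - k < m - 1 - k ∨ (m - 1 - k = m - 1 - k ∧ m - 1 - (j + 1) < m - 1 - j)) := by omega
          unfold cellG
          repeat rw [if_neg hDR0]
          repeat rw [if_pos hDR1]
          rw [pvDictModDown, pvDictModRight, pvDictModRight]
          refine congrArg PySem.Dict.mk ?_
          simp only [List.cons.injEq, Prod.mk.injEq, and_true, true_and]
          rw [pvDownRec M m (m - 1 - j) (m - 1 - k) (by omega) (by omega) (by omega),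
              pvRightRec M m (m - 1 - j) (m - 1 - k) (by omega) (by omega) (by omega)]
          simp only [ne_eq, hc, not_false_eq_true, if_true]
          rw [if_neg hj1, if_pos hk1]
          constructor <;> ring
        · simp only [if_neg hKey]
          exact pvCellGCongr M m k (j + 1) j k (j + 1) (j + 1) y x (by omega) (by omega)
      · rw [if_neg hk1]
        apply List.map_congr_left; intro y hy
        apply List.map_congr_left; intro x hx
        have hyb := PySem.List.mem_pyRange_one.mp hy
        have hxb := PySem.List.mem_pyRange_one.mp hx
        by_cases hKey : y = m - 1 - j ∧ x = m - 1 - k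
        · obtain ⟨h1, h2⟩ := hKey
          rw [h1, h2]
          have htrue : (m - 1 - j = m - 1 - j ∧ m - 1 - k = m - 1 - k) := ⟨rfl, rfl⟩
          repeat rw [if_pos htrue]
          have hDR0 : ¬(m - 1 - k < m - 1 - k ∨ (m - 1 - k = m - 1 - k ∧ m - 1 - j < m - 1 - j)) := by omega
          have hDR1 : (m - 1 - k < m - 1 - k ∨ (m - 1 - k = m - 1 - k ∧ m - 1 - (j + 1) < m - 1 - j)) := by omega
          unfold cellG
          repeat rw [if_neg hDR0]
          repeat rw [if_pos hDR1]
          rw [pvDictModDown, pvDictModRight]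
          refine congrArg PySem.Dict.mk ?_
          simp only [List.cons.injEq, Prod.mk.injEq, and_true, true_and]
          rw [pvDownRec M m (m - 1 - j) (m - 1 - k) (by omega) (by omega) (by omega),
              pvRightRec M m (m - 1 - j) (m - 1 - k) (by omega) (by omega) (by omega)]
          simp only [ne_eq, hc, not_false_eq_true, if_true]
          rw [if_neg hj1, if_neg hk1]
          constructor <;> ring
        · simp only [if_neg hKey]
          exact pvCellGCongr M m k (j + 1) j k (j + 1) (j + 1) y x (by omega) (by omega)

theorem pvGABoundary (M : List (List Int)) (m k : Int) (_hk0 : 0 ≤ k) (_hkm : k < m) :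
    GA M m k m m = GA M m (k + 1) 0 0 := by
  unfold GA
  apply List.map_congr_left; intro y hy
  apply List.map_congr_left; intro x hx
  have hy' := PySem.List.mem_pyRange_one.mp hy
  have hx' := PySem.List.mem_pyRange_one.mp hx
  exact pvCellGCongr M m k m m (k + 1) 0 0 y x (by omega) (by omega)

theorem pvInnerLoop (M : List (List Int)) (m k : Int) (hk0 : 0 ≤ k) (hkm : k < m) :
    ∀ (j : Int), 0 ≤ j → j ≤ m →
      aInner M m k (m - 1 - k) j (m - 1 - j) (GA M m k j j) = GA M m k m m := by
  have main : ∀ (fuel : Nat) (j : Int), (m - j).toNat ≤ fuel → 0 ≤ j → j ≤ m →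
      aInner M m k (m - 1 - k) j (m - 1 - j) (GA M m k j j) = GA M m k m m := by
    intro fuel
    induction fuel with
    | zero =>
      intro j hf h0 hm
      have hj : j = m := by omega
      subst hj
      rw [aInner, dif_neg (by omega)]
    | succ f ih =>
      intro j hf h0 hm
      by_cases hjm : j < m
      · rw [aInner, dif_pos ⟨hjm, by omega⟩]
        simp only []
        rw [pvBlockUL M m k j hk0 hkm h0 hjm]
        rw [pvBlockDR M m k j hk0 hkm h0 hjm]
        have ih' := ih (j + 1) (by omega) (by omega) (by omega)
        rw [show m - 1 - (j + 1) = m - 1 - j - 1 by ring] at ih'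
        exact ih'
      · have hj : j = m := by omega
        subst hj
        rw [aInner, dif_neg (by omega)]
  intro j h0 hm
  exact main (m - j).toNat j le_rfl h0 hm

theorem pvOuterLoop (M : List (List Int)) (m : Int) :
    ∀ (k : Int), 0 ≤ k → k ≤ m →
      aOuter M m k (m - 1 - k) (GA M m k 0 0) = GA M m m 0 0 := by
  have main : ∀ (fuel : Nat) (k : Int), (m - k).toNat ≤ fuel → 0 ≤ k → k ≤ m →
      aOuter M m k (m - 1 - k) (GA M m k 0 0) = GA M m m 0 0 := by
    intro fuel
    induction fuel with
    | zero =>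
      intro k hf h0 hm
      have hk : k = m := by omega
      subst hk
      rw [aOuter, dif_neg (by omega)]
    | succ f ih =>
      intro k hf h0 hm
      by_cases hkm : k < m
      · rw [aOuter, dif_pos ⟨hkm, by omega⟩]
        have hinner := pvInnerLoop M m k h0 hkm 0 le_rfl (by omega)
        rw [show m - 1 - (0:Int) = m - 1 by ring] at hinner
        rw [hinner, pvGABoundary M m k h0 hkm]
        have ih' := ih (k + 1) (by omega) (by omega) (by omega)
        rw [show m - 1 - (k + 1) = m - 1 - k - 1 by ring] at ih'
        exact ih'
      · have hk : k = m := by omega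
        subst hk
        rw [aOuter, dif_neg (by omega)]
  intro k h0 hm
  exact main (m - k).toNat k le_rfl h0 hm

theorem pvInitEq (M : List (List Int)) (m : Int) :
    (PySem.List.pyRange 0 m 1).map (fun _ => (PySem.List.pyRange 0 m 1).map (fun _ => aCellInit))
      = GA M m 0 0 0 := by
  unfold GA
  apply List.map_congr_left; intro y hy
  apply List.map_congr_left; intro x hx
  have hy' := PySem.List.mem_pyRange_one.mp hy
  have hx' := PySem.List.mem_pyRange_one.mp hx
  unfold cellG aCellInit
  rw [if_neg (by omega), if_neg (by omega), if_neg (by omega), if_neg (by omega)]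

theorem get_direction_count_matrix_eq (M : List (List Int)) (m : Int) :
    get_direction_count_matrix M m = specMat M m.toNat := by
  by_cases hm : m ≤ 0
  · rw [get_direction_count_matrix]
    rw [PySem.List.pyRange_one_eq_nil (by omega)]
    rw [aOuter, dif_neg (by omega)]
    rw [show m.toNat = 0 by omega]
    simp [specMat]
  · rw [get_direction_count_matrix]
    rw [pvInitEq M m]
    have h1 := pvOuterLoop M m 0 le_rfl (by omega)
    rw [show m - 1 - (0:Int) = m - 1 by ring] at h1
    rw [h1]
    have hrng : PySem.List.pyRange 0 m 1 = (List.range m.toNat).map (fun k : Nat => (k : Int)) := by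
      simp [PySem.List.pyRange_one]
    unfold GA
    rw [hrng, specMat]
    simp only [List.map_map]
    apply List.map_congr_left; intro a ha
    simp only [Function.comp]
    rw [List.map_map]
    apply List.map_congr_left; intro b hb
    have ha' := List.mem_range.mp ha
    have hb' := List.mem_range.mp hb
    simp only [Function.comp]
    unfold cellG
    rw [if_pos (by omega : (b:Int) < m ∨ ((b:Int) = m ∧ (a:Int) < 0)),
        if_pos (by omega : m - 1 - m < (b:Int) ∨ ((b:Int) = m - 1 - m ∧ m - 1 - 0 < (a:Int))),
        if_pos (by omega : (b:Int) < m ∨ ((b:Int) = m ∧ (a:Int) < 0)),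
        if_pos (by omega : m - 1 - m < (b:Int) ∨ ((b:Int) = m - 1 - m ∧ m - 1 - 0 < (a:Int)))]
    simp [Int.toNat_natCast]

-- ===== VERDICT (by name: the statement is the Claim_ definition above) =====
theorem get_direction_count_matrix_spec : Claim_equal_get_direction_count_matrix := by
  intro M m _ _
  unfold Spec_get_direction_count_matrix
  rw [get_direction_count_matrix_eq, get_direction_count_matrix_alt_eq]
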